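-- pv_equiv track=rewrite | github.com/e-ivaldi/varnish-cache | lib/libvcl/generate.py | mk_args
-- ===== SOURCE A (Python) =====
-- def mk_args(c, r=False):
-- 	if c == "":
-- 		return ""
-- 	s = ""
-- 	for i in c:
-- 		if i == "c":
-- 			continue;
-- 		if i == "R":
-- 			s += "req"
-- 	if s != "" and not r:
-- 		s += ","
-- 	return s
-- ===== SOURCE B (Python) =====
-- def mk_args(c, r=False):
--     def go(t):
--         # divide and conquer: a single char maps to its token, halves are combined
--         # by concatenation (associativity makes the split point irrelevant)
--         if len(t) <= 1:
--             return "req" if t == "R" else ""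
--         m = len(t) // 2
--         return go(t[:m]) + go(t[m:])
--     s = go(c)
--     return s + "," if s and not r else s
-- ===== Notes on version B (the rewrite author's own statement) =====
-- stated objective: alternative
-- what changed: replaces A's linear scan with a string accumulator by a divide-and-conquer recursion that splits the string in halves, maps a single character to its token at the leaves, and combines results by concatenation, with the comma applied once at the end and no empty-string special case
import Mathlib
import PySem

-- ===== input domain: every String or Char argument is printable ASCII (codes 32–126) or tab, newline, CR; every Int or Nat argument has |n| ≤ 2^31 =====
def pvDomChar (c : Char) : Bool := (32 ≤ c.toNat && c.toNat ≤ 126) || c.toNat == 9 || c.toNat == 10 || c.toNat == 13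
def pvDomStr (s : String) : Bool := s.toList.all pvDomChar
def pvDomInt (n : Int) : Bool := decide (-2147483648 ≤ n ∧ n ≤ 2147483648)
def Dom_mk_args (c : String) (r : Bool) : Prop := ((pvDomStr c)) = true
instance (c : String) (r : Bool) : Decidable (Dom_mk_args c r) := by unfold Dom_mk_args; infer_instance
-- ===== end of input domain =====

-- B replaces A's linear accumulating scan by a divide-and-conquer recursion over the
-- string (halve, recurse, concatenate); objective: alternative decomposition.

-- ===== PORT A =====
def mk_args (c : String) (r : Bool) : String :=
  if c = "" then ""
  else
    let s := c.toList.foldl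
      (fun s i => if i = 'c' then s else if i = 'R' then s ++ "req" else s) ""
    if s ≠ "" ∧ r = false then s ++ "," else s

-- ===== PORT B =====
-- recursive helper 'go' from Source B: halve the string, recurse on both halves, concatenate
def mk_args_go (l : List Char) : String :=
  if l.length ≤ 1 then (if l = ['R'] then "req" else "")
  else
    mk_args_go (l.take (l.length / 2)) ++ mk_args_go (l.drop (l.length / 2))
termination_by l.length
decreasing_by
  · simp only [List.length_take]
    omega
  · simp only [List.length_drop]
    omega

def mk_args_alt (c : String) (r : Bool) : String :=
  let s := mk_args_go c.toList
  if s ≠ "" ∧ r = false then s ++ "," else s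

-- ===== PRECONDITION & SPEC =====
def Spec_mk_args (c : String) (r : Bool) (out : String) : Prop := out = mk_args_alt c r
instance (c : String) (r : Bool) (out : String) : Decidable (Spec_mk_args c r out) := by unfold Spec_mk_args; infer_instance

-- ===== CLAIM (what is proved, stated in full; the proofs are below) =====
def Claim_equal_mk_args : Prop := ∀ (c : String) (r : Bool), Dom_mk_args c r → Spec_mk_args c r (mk_args c r)

-- ===== LEMMAS AND PROOFS =====

-- A's loop body, as a named function for the lemmas.
def pvStep (s : String) (i : Char) : String :=
  if i = 'c' then s else if i = 'R' then s ++ "req" else s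

-- the forward fold from accumulator a shifts out of the fold
theorem foldl_pvStep_shift (l : List Char) (a : String) :
    l.foldl pvStep a = a ++ l.foldl pvStep "" := by
  induction l generalizing a with
  | nil => simp
  | cons x xs ih =>
    simp only [List.foldl_cons]
    rw [ih (pvStep a x), ih (pvStep "" x)]
    have : pvStep a x = a ++ pvStep "" x := by
      unfold pvStep; split_ifs <;> simp
    rw [this, String.append_assoc]

-- B's divide-and-conquer recursion computes A's fold
theorem mk_args_go_eq_fold (l : List Char) :
    mk_args_go l = l.foldl pvStep "" := by
  induction hn : l.length using Nat.strong_induction_on generalizing l with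
  | _ n ih =>
  subst hn
  by_cases h : l.length ≤ 1
  · rw [mk_args_go, if_pos h]
    match l, h with
    | [], _ => rfl
    | [x], _ =>
      simp only [List.foldl_cons, List.foldl_nil]
      unfold pvStep
      by_cases hx : x = 'R'
      · subst hx; simp
      · have : ¬ ([x] = ['R']) := by simpa using hx
        rw [if_neg this]
        split_ifs <;> simp_all
  · rw [mk_args_go, if_neg h,
      ih _ (by simp only [List.length_take]; omega) _ rfl,
      ih _ (by simp only [List.length_drop]; omega) _ rfl]
    conv_rhs => rw [← List.take_append_drop (l.length / 2) l]
    rw [List.foldl_append]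
    exact (foldl_pvStep_shift _ _).symm

-- ===== VERDICT (by name: the statement is the Claim_ definition above) =====
theorem mk_args_spec : Claim_equal_mk_args := by
  unfold Claim_equal_mk_args
  intro c r _
  unfold Spec_mk_args mk_args mk_args_alt
  by_cases hc : c = ""
  · subst hc
    cases r <;> simp [mk_args_go]
  · simp only [hc, if_false, mk_args_go_eq_fold]
    rfl
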